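-- pv_equiv track=rewrite | github.com/kKEeWwon-2314/Program-Archive | Renert-iCS1/iCS1 Assignments/Karel The Robot/karel/syntax.py | _find_condition
-- ===== SOURCE A (Python) =====
-- def _find_condition(tokens):
--     """
--     Returns the non-bracket, non-empty condition
--     token immediately before the colon, or an empty string
--     if there is no colon or the tokens begin with the colon.
--
--     Args:
--         tokens: The tokens to search through.
--     """
--     try:
--         # find token with :
--         contains = [x for x in enumerate(tokens) if ':' in x[1]][0]
--         # loop back to find non bracket item
--         if contains[1].startswith(':'):
--             for i in range(contains[0]-1, -1, -1):
--                 contains = tokens[i].strip('():')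
--                 if contains: return contains
--         else:
--             return contains[1].partition(':')[0].strip('():')
--     except:
--         return ''
-- ===== SOURCE B (Python) =====
-- def _find_condition(tokens):
--     last = ''
--     for x in tokens:
--         if ':' in x:
--             if x.startswith(':'):
--                 return last
--             return x.partition(':')[0].strip('():')
--         s = x.strip('():')
--         if s:
--             last = s
--     return ''
-- ===== Notes on version B (the rewrite author's own statement) =====
-- stated objective: simpler
-- what changed: A builds an enumerated filtered list of colon tokens and then scans backwards by index for the nearest non-bracket token; B is a single forward pass with an accumulator holding the last non-bracket token, deciding at the first colon token.
-- outside the precondition, e.g. on _find_condition([':x']): A returns None, B returns ''; on _find_condition(['(', ':x', 'd']): A returns None, B returns ''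
import Mathlib
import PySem

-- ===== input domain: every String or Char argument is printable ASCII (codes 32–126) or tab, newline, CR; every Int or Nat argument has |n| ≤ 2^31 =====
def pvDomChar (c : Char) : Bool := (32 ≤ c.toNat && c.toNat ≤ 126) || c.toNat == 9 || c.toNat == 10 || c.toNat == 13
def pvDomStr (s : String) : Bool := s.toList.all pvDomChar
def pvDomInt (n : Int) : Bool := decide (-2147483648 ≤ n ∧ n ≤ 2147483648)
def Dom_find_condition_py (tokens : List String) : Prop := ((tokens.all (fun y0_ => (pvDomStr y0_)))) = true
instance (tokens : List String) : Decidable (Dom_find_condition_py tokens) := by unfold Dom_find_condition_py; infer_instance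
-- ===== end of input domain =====

-- B replaces A's enumerate-filter-then-backward-index-scan with a single forward pass carrying the
-- last non-bracket token as an accumulator (objective: simpler; return value only, no mutation).

-- ===== PORT A =====
-- x.partition(':')[0] for a string known to contain ':' = the characters before the first ':' (exact; ported by hand)
def pvPartitionFst (x : String) : String := String.ofList (x.toList.takeWhile (fun c => c ≠ ':'))

-- 'for i in range(contains[0]-1, -1, -1): contains = tokens[i].strip('():'); if contains: return contains'
-- recursion on the next index + 1; reaching 0 = loop exhausted (Python A falls through and returns None; excluded by Pre_)
def pvALoop (tokens : List String) : Nat → String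
  | 0 => ""
  | i + 1 =>
    let c := PySem.Str.stripChars (PySem.List.pyGetD tokens (Int.ofNat i) "") "():"
    if c ≠ "" then c else pvALoop tokens i

def find_condition_py (tokens : List String) : String :=
  match ((PySem.List.enumerate tokens 0).filter (fun p => PySem.Str.isIn ":" p.2)).head? with
  | none => ""            -- [..][0] raises IndexError, caught: return ''
  | some contains =>
    if PySem.Str.startswith contains.2 ":" then
      pvALoop tokens contains.1.toNat
    else
      PySem.Str.stripChars (pvPartitionFst contains.2) "():"

-- ===== PORT B =====
def pvBLoop (tokens : List String) (last : String) : String :=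
  match tokens with
  | [] => ""
  | x :: xs =>
    if PySem.Str.isIn ":" x then
      if PySem.Str.startswith x ":" then last
      else PySem.Str.stripChars (pvPartitionFst x) "():"
    else
      let s := PySem.Str.stripChars x "():"
      pvBLoop xs (if s ≠ "" then s else last)

def find_condition_py_alt (tokens : List String) : String := pvBLoop tokens ""

-- ===== PRECONDITION & SPEC =====
-- Pre_ excludes inputs where the first colon-bearing token starts with ':' and every earlier token
-- strips ('():') to empty: there Python A falls off its backward loop and returns None, which is not
-- a str (B returns '' there).
def Pre_find_condition_py (tokens : List String) : Prop :=
  ((tokens.dropWhile (fun t => !PySem.Str.isIn ":" t)).head?.all (fun x =>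
    !PySem.Str.startswith x ":" ||
    (tokens.takeWhile (fun t => !PySem.Str.isIn ":" t)).any
      (fun y => PySem.Str.stripChars y "():" ≠ ""))) = true
instance (tokens : List String) : Decidable (Pre_find_condition_py tokens) := by
  unfold Pre_find_condition_py; infer_instance

def pvWitness_find_condition_py : List String := ["foo", "(", ":x"]

def Spec_find_condition_py (tokens : List String) (out : String) : Prop := out = find_condition_py_alt tokens
instance (tokens : List String) (out : String) : Decidable (Spec_find_condition_py tokens out) := by unfold Spec_find_condition_py; infer_instance

-- ===== CLAIM (what is proved, stated in full; the proofs are below) =====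
def Claim_equal_find_condition_py : Prop := ∀ (tokens : List String), Dom_find_condition_py tokens → Pre_find_condition_py tokens → Spec_find_condition_py tokens (find_condition_py tokens)

-- ===== LEMMAS AND PROOFS =====

-- helper for proofs: the accumulator update B performs on a non-colon token
def pvUpd (l : String) (y : String) : String :=
  if PySem.Str.stripChars y "():" ≠ "" then PySem.Str.stripChars y "():" else l

-- head of A's filtered enumeration, as takeWhile/dropWhile of the list
theorem pvEnumFilterHead {α : Type} (g : α → Bool) (tokens : List α) (s : Int) :
    ((PySem.List.enumerate tokens s).filter (fun p => g p.2)).head? =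
      match tokens.dropWhile (fun t => !g t) with
      | [] => none
      | x :: _ => some (s + (tokens.takeWhile (fun t => !g t)).length, x) := by
  induction tokens generalizing s with
  | nil => simp [PySem.List.enumerate]
  | cons t ts ih =>
    cases h : g t with
    | true => simp [PySem.List.enumerate_cons, h]
    | false =>
      simp only [PySem.List.enumerate_cons, List.filter_cons, List.dropWhile_cons,
        List.takeWhile_cons, h, Bool.not_false, Bool.false_eq_true, if_false, if_true]
      rw [ih (s + 1)]
      cases hd : ts.dropWhile (fun t => !g t) with
      | nil => simp
      | cons x r => simp only [List.length_cons]; congr 2; push_cast; ring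

-- A's backward scan over the prefix = B's forward accumulator over the prefix
theorem pvALoop_eq_fold (pre suf : List String) :
    pvALoop (pre ++ suf) pre.length = pre.foldl pvUpd "" := by
  induction pre using List.reverseRecOn generalizing suf with
  | nil => simp [pvALoop]
  | append_singleton ys y ih =>
    have hget : PySem.List.pyGetD ((ys ++ [y]) ++ suf) (Int.ofNat ys.length) "" = y := by
      have h0 : Int.ofNat ys.length = ((ys.length : Nat) : Int) := rfl
      rw [h0, PySem.List.pyGetD_natCast]
      simp [List.getD, List.append_assoc]
    have hlen : (ys ++ [y]).length = ys.length + 1 := by simp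
    rw [hlen]
    show (if PySem.Str.stripChars (PySem.List.pyGetD ((ys ++ [y]) ++ suf) (Int.ofNat ys.length) "") "():" ≠ ""
          then PySem.Str.stripChars (PySem.List.pyGetD ((ys ++ [y]) ++ suf) (Int.ofNat ys.length) "") "():"
          else pvALoop ((ys ++ [y]) ++ suf) ys.length) = (ys ++ [y]).foldl pvUpd ""
    rw [hget]
    have hre : (ys ++ [y]) ++ suf = ys ++ ([y] ++ suf) := by simp
    rw [hre]
    by_cases hc : PySem.Str.stripChars y "():" ≠ ""
    · simp [hc, List.foldl_append, pvUpd]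
    · simp [hc, List.foldl_append, pvUpd, ih (y :: suf)]

-- B's pass through a colon-free prefix followed by a colon token
theorem pvBLoop_split (pre : List String) (x : String) (suf : List String) (last : String)
    (hpre : ∀ y ∈ pre, PySem.Str.isIn ":" y = false)
    (hx : PySem.Str.isIn ":" x = true) :
    pvBLoop (pre ++ x :: suf) last =
      (if PySem.Str.startswith x ":" then pre.foldl pvUpd last
       else PySem.Str.stripChars (pvPartitionFst x) "():") := by
  induction pre generalizing last with
  | nil => simp only [List.nil_append, pvBLoop, hx, if_pos, List.foldl_nil]
  | cons y ys ih =>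
    have hy := hpre y (by simp)
    simp only [List.cons_append, pvBLoop, hy, Bool.false_eq_true, if_false, List.foldl_cons]
    rw [ih _ (fun z hz => hpre z (by simp [hz]))]
    by_cases hc : PySem.Str.stripChars y "():" = ""
    · simp [pvUpd, hc]
    · simp [pvUpd, hc]

-- B on a colon-free list returns ''
theorem pvBLoop_nocolon (tokens : List String) (last : String)
    (h : ∀ y ∈ tokens, PySem.Str.isIn ":" y = false) :
    pvBLoop tokens last = "" := by
  induction tokens generalizing last with
  | nil => rfl
  | cons t ts ih =>
    have ht := h t (by simp)
    simp only [pvBLoop, ht, Bool.false_eq_true, if_false]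
    exact ih _ (fun y hy => h y (by simp [hy]))

-- ===== VERDICT (by name: the statement is the Claim_ definition above) =====
theorem find_condition_py_spec : Claim_equal_find_condition_py := by
  intro tokens _ _
  unfold Spec_find_condition_py find_condition_py find_condition_py_alt
  rw [pvEnumFilterHead (fun t => PySem.Str.isIn ":" t) tokens 0]
  cases hd : tokens.dropWhile (fun t => !PySem.Str.isIn ":" t) with
  | nil =>
    rw [pvBLoop_nocolon tokens ""]
    intro y hy
    have hmem : y ∈ tokens.takeWhile (fun t => !PySem.Str.isIn ":" t) := by
      conv at hy => rw [← List.takeWhile_append_dropWhile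
        (p := fun t => !PySem.Str.isIn ":" t) (l := tokens)]
      rw [hd] at hy; simpa using hy
    simpa using List.mem_takeWhile_imp hmem
  | cons x suf =>
    have hx : PySem.Str.isIn ":" x = true := by
      have hh := List.head?_dropWhile_not (p := fun t => !PySem.Str.isIn ":" t) (l := tokens)
      rw [hd] at hh; simpa using hh
    have hpre : ∀ y ∈ tokens.takeWhile (fun t => !PySem.Str.isIn ":" t),
        PySem.Str.isIn ":" y = false := fun y hy => by
      simpa using List.mem_takeWhile_imp hy
    obtain ⟨pre, hp⟩ : ∃ pre, tokens.takeWhile (fun t => !PySem.Str.isIn ":" t) = pre := ⟨_, rfl⟩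
    have htok : tokens = pre ++ x :: suf := by
      conv_lhs => rw [← List.takeWhile_append_dropWhile
        (p := fun t => !PySem.Str.isIn ":" t) (l := tokens)]
      rw [hd, hp]
    rw [hp] at hpre
    simp only [hp]
    conv_rhs => rw [htok]
    rw [pvBLoop_split pre x suf "" hpre hx]
    by_cases hsw : PySem.Str.startswith x ":" = true
    · rw [if_pos hsw, if_pos hsw]
      have htn : ((0 : Int) + (pre.length : Int)).toNat = pre.length := by omega
      rw [htn]
      conv_lhs => rw [htok]
      exact pvALoop_eq_fold pre (x :: suf)
    · rw [if_neg hsw, if_neg hsw]
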